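-- pv_equiv track=rewrite | github.com/liangxiaoxuan/Algorithm-training | test.py | combinationlist
-- ===== SOURCE A (Python) =====
-- from itertools import permutations
--
-- def combinationlist(s):
--     """
--
--     :param s: string
--     :return: list of all valid string
--     """
--     # in case s == 0
--     if len(s) == 0:
--         return []
--
--     # in case s has only 1 string
--     if len(s) == 1:
--         return [s]
--
--     # list of all the combinations
--     ss = list(permutations(s))
--     res = []
--     for i in ss:
--         # number != fist string and word character != last string
--         if i[0].isdigit() == True or i[len(i)-1].isalpha() == True:
--             continue
--         else:
--             ii = "".join(i)
--             res.append(ii)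
--
--     return res
-- ===== SOURCE B (Python) =====
-- def combinationlist(s):
--     """
--
--     :param s: string
--     :return: list of all valid string
--     """
--     if len(s) == 0:
--         return []
--     if len(s) == 1:
--         return [s]
--
--     def tails(remaining):
--         # permutations of `remaining` that end in a non-alphabetic character,
--         # generated in itertools order (pick left to right, no dedup)
--         if len(remaining) == 1:
--             return [] if remaining.isalpha() else [remaining]
--         out = []
--         for i in range(len(remaining)):
--             c = remaining[i]
--             rest = remaining[:i] + remaining[i + 1:]
--             for t in tails(rest):
--                 out.append(c + t)
--         return out
--
--     res = []
--     for i in range(len(s)):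
--         c = s[i]
--         if not c.isdigit():  # prune: permutations starting with a digit are invalid
--             rest = s[:i] + s[i + 1:]
--             for t in tails(rest):
--                 res.append(c + t)
--     return res
-- ===== Notes on version B (the rewrite author's own statement) =====
-- stated objective: alternative
-- what changed: B replaces A's generate-all-permutations-then-filter with a pruned recursive generator: it picks the first character directly (skipping digit subtrees entirely) and a recursive helper builds only the permutations of the rest that end in a non-alphabetic character, in the same itertools order.
import Mathlib
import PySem

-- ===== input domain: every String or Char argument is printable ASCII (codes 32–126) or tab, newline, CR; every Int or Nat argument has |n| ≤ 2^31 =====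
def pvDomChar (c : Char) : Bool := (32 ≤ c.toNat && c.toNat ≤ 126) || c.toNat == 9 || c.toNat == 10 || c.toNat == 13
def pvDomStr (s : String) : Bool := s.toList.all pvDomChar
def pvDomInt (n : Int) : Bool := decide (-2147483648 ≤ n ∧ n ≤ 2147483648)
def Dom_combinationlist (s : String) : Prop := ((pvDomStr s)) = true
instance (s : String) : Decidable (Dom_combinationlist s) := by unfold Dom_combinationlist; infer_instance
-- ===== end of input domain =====

-- B replaces A's generate-all-permutations-then-filter by a pruned recursive generator
-- (same itertools order; digit first characters cut at the root, the last-character test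
-- applied at the leaves): an alternative decomposition of the same task.

-- ===== PORT A =====
-- A: ss = list(permutations(s)) (itertools order), then a filter loop that skips
-- tuples whose first char is a digit or whose last char is alphabetic, joining the rest.
def combinationlist (s : String) : List String :=
  -- cs = the characters of s; ss = list(permutations(s))
  if s.toList.length == 0 then []
  else if s.toList.length == 1 then [s]
  else
    (PySem.List.permutations s.toList s.toList.length).foldl (fun res p =>
      if PySem.Chars.isdigit p.headI || PySem.Chars.isalpha (p.getD (p.length - 1) ' ') then
        res
      else
        res ++ [String.ofList p]) []

-- ===== PORT B =====
-- tails remaining = permutations of `remaining` that end in a non-alphabetic char,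
-- in itertools order; fuel = remaining.length makes the recursion structural.
def pvTails : Nat → List Char → List (List Char)
  | 0, _ => []
  | fuel + 1, rem =>
    if rem.length == 1 then
      if PySem.Chars.isalpha rem.headI then [] else [rem]
    else
      (List.range rem.length).flatMap (fun i =>
        (pvTails fuel (rem.eraseIdx i)).map (fun t => rem.getD i ' ' :: t))

def combinationlist_alt (s : String) : List String :=
  if s.toList.length == 0 then []
  else if s.toList.length == 1 then [s]
  else
    (List.range s.toList.length).flatMap (fun i =>
      if PySem.Chars.isdigit (s.toList.getD i ' ') then []
      else (pvTails (s.toList.length - 1) (s.toList.eraseIdx i)).map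
        (fun t => String.ofList (s.toList.getD i ' ' :: t)))

-- ===== PRECONDITION & SPEC =====
def Spec_combinationlist (s : String) (out : List String) : Prop := out = combinationlist_alt s
instance (s : String) (out : List String) : Decidable (Spec_combinationlist s out) := by unfold Spec_combinationlist; infer_instance

-- ===== CLAIM (what is proved, stated in full; the proofs are below) =====
def Claim_equal_combinationlist : Prop := ∀ (s : String), Dom_combinationlist s → Spec_combinationlist s (combinationlist s)

-- ===== LEMMAS AND PROOFS =====

-- one unfolding step of PySem.List.permutations, with the in-range index lookup resolved
theorem pv_perms_succ (l : List Char) (r : Nat) :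
    PySem.List.permutations l (r + 1)
      = (List.range l.length).flatMap (fun i =>
          (PySem.List.permutations (l.eraseIdx i) r).map (fun p => l.getD i ' ' :: p)) := by
  show (List.range l.length).flatMap _ = _
  rw [List.flatMap, List.flatMap]
  congr 1
  apply List.map_congr_left
  intro i hi
  rw [List.mem_range] at hi
  simp [List.getD_eq_getElem?_getD, List.getElem?_eq_getElem hi]

-- every member of permutations l r has length r
theorem pv_len_mem_perms {α : Type} (r : Nat) (l p : List α)
    (h : p ∈ PySem.List.permutations l r) : p.length = r := by
  induction r generalizing l p with
  | zero =>
    simp only [PySem.List.permutations, List.mem_singleton] at h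
    simp [h]
  | succ r ih =>
    simp only [PySem.List.permutations, List.mem_flatMap, List.mem_range] at h
    obtain ⟨i, hi, hp⟩ := h
    cases hgi : l[i]? with
    | none => rw [hgi] at hp; simp at hp
    | some c =>
      rw [hgi] at hp
      simp only [List.mem_map] at hp
      obtain ⟨q, hq, rfl⟩ := hp
      simp [ih _ _ hq]

-- the last-character filter pushed into the generator
set_option maxRecDepth 8192 in
theorem pv_tails_eq : ∀ (n : Nat) (l : List Char), l.length = n → 1 ≤ n →
    pvTails n l
      = (PySem.List.permutations l n).filter
          (fun p => ! PySem.Chars.isalpha (p.getD (p.length - 1) ' ')) := by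
  intro n
  induction n with
  | zero => intro l _ h; omega
  | succ n ih =>
    intro l hl _
    rcases Nat.eq_zero_or_pos n with hn0 | hn1
    · -- l = [c]
      subst hn0
      obtain ⟨c, rfl⟩ : ∃ c, l = [c] := by
        cases l with
        | nil => simp at hl
        | cons a t =>
          cases t with
          | nil => exact ⟨a, rfl⟩
          | cons b u => simp at hl
      have hp1 : PySem.List.permutations [c] 1 = [[c]] := by
        rw [pv_perms_succ]; rfl
      rw [hp1]
      show (if PySem.Chars.isalpha c = true then ([] : List (List Char)) else [[c]])
        = List.filter (fun p => ! PySem.Chars.isalpha (p.getD (p.length - 1) ' ')) [[c]]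
      by_cases h : PySem.Chars.isalpha c = true <;> simp [List.filter, List.getD, h]
    · -- length ≥ 2
      rw [pv_perms_succ, List.filter_flatMap]
      have hlen1 : (l.length == 1) = false := by simp; omega
      conv_lhs => rw [pvTails]
      rw [hlen1]
      simp only [Bool.false_eq_true, if_false]
      apply List.flatMap_congr
      intro i hi
      rw [List.mem_range] at hi
      have herase : (l.eraseIdx i).length = n := by
        rw [List.length_eraseIdx_of_lt (by omega)]; omega
      rw [ih (l.eraseIdx i) herase hn1, List.filter_map]
      congr 1
      apply List.filter_congr
      intro p hp
      have hplen : p.length = n := pv_len_mem_perms n _ p hp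
      cases p with
      | nil => simp at hplen; omega
      | cons a q => simp; rfl

set_option maxRecDepth 8192 in
theorem combinationlist_spec' (s : String) :
    combinationlist s = combinationlist_alt s := by
  unfold combinationlist combinationlist_alt
  by_cases h0 : s.toList.length = 0
  · have hb0 : (s.toList.length == 0) = true := by rw [beq_iff_eq]; exact h0
    rw [hb0]
    rfl
  by_cases h1 : s.toList.length = 1
  · have hb1 : (s.toList.length == 1) = true := by rw [beq_iff_eq]; exact h1
    rw [hb1]
    rfl
  · have hb0 : (s.toList.length == 0) = false := by rw [beq_eq_false_iff_ne]; exact h0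
    have hb1 : (s.toList.length == 1) = false := by rw [beq_eq_false_iff_ne]; exact h1
    rw [hb0, hb1]
    simp only [Bool.false_eq_true, if_false]
    -- rewrite A's loop as filter-then-map
    have hflip : (fun (res : List String) (p : List Char) =>
        if PySem.Chars.isdigit p.headI || PySem.Chars.isalpha (p.getD (p.length - 1) ' ') then
          res
        else res ++ [String.ofList p])
      = (fun res p =>
        if (! (PySem.Chars.isdigit p.headI || PySem.Chars.isalpha (p.getD (p.length - 1) ' '))) = true
        then res ++ [String.ofList p] else res) := by
      funext res p
      cases hc : PySem.Chars.isdigit p.headI || PySem.Chars.isalpha (p.getD (p.length - 1) ' ') <;>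
        simp
    rw [hflip, PySem.List.foldl_append_if, List.nil_append]
    -- unfold one level of permutations
    obtain ⟨m, hm⟩ : ∃ m, s.toList.length = m + 1 := ⟨s.toList.length - 1, by omega⟩
    rw [hm, pv_perms_succ, hm, List.filter_flatMap, List.map_flatMap]
    rw [show m + 1 - 1 = m from rfl]
    apply List.flatMap_congr
    intro i hi
    rw [List.mem_range] at hi
    have herase : (s.toList.eraseIdx i).length = m := by
      rw [List.length_eraseIdx_of_lt (by omega)]; omega
    have hm1 : 1 ≤ m := by omega
    rw [← herase] at hm1
    rw [← herase]
    rw [pv_tails_eq (s.toList.eraseIdx i).length (s.toList.eraseIdx i) rfl hm1]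
    by_cases hd : PySem.Chars.isdigit (s.toList.getD i ' ') = true
    · rw [if_pos hd]
      rw [List.filter_eq_nil_iff.mpr ?_, List.map_nil]
      intro p hp
      rw [List.mem_map] at hp
      obtain ⟨q, hq, rfl⟩ := hp
      simp only [List.headI, hd, Bool.true_or, Bool.not_true]
      exact fun h => Bool.noConfusion h
    · rw [if_neg hd]
      rw [List.filter_map, List.map_map]
      congr 1
      apply List.filter_congr
      intro p hp
      have hplen : p.length = (s.toList.eraseIdx i).length :=
        pv_len_mem_perms _ _ p hp
      rw [Bool.not_eq_true] at hd
      cases p with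
      | nil => simp at hplen; omega
      | cons a q =>
        simp only [List.getD_eq_getElem?_getD] at hd
        simp [List.headI, hd]; rfl

-- ===== VERDICT (by name: the statement is the Claim_ definition above) =====
theorem combinationlist_spec : Claim_equal_combinationlist := by
  intro s _
  exact combinationlist_spec' s
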